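-- pv_equiv track=rewrite | github.com/jtambe/LeetCode | TwoPointers/Aledade_run_length_ordered.py | decreasingList
-- ===== SOURCE A (Python) =====
-- from typing import List
--
-- def decreasingList(A:List[int], Y:int) -> List[int]:
--     """
--     Returns a list of index numbers for decreasing sequence
--     param A: list of values
--     param Y: run length
--     """
--     decreasing: List[int] = []
--     l,r, count = 0, 0, 0
--     while (r < len(A)-1):
--         # if consecutive numbers are decreasing, we increment the right pointer & counter
--         # once we find decreasing run_length, we just move left pointer
--         if (A[r] - 1 == A[r+1]):
--             r += 1
--             count += 1
--             if (count == Y-1):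
--                 decreasing.append(l)
--                 count -= 1
--                 l += 1
--         # if consecutive numbers are not decreasing, we simply move both pointers
--         # additionally, we mark count = 0 to wipe off counter because of previous run_length data
--         else:
--             r += 1
--             l = r
--             count = 0
--     return decreasing
-- ===== SOURCE B (Python) =====
-- from typing import List
--
-- def decreasingList(A: List[int], Y: int) -> List[int]:
--     # Group the array into maximal runs that decrease by exactly 1, then
--     # emit every start index of a length-Y window inside each run.
--     # A window needs Y >= 2 elements to contain a decreasing step.
--     n = len(A)
--     result: List[int] = []
--     i = 0
--     while i < n:
--         j = i
--         while j + 1 < n and A[j] - 1 == A[j + 1]: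
--             j += 1
--         if Y >= 2:
--             result.extend(range(i, j - Y + 2))
--         i = j + 1
--     return result
-- ===== Notes on version B (the rewrite author's own statement) =====
-- stated objective: alternative
-- what changed: Replaces A's single counter-driven sliding-window pass (left/right pointers with an incrementally maintained run counter) by a two-level decomposition: group the array into maximal decrease-by-1 runs with an inner scan, then emit all length-Y window start indices of each run at once via range(i, j - Y + 2).
import Mathlib
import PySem

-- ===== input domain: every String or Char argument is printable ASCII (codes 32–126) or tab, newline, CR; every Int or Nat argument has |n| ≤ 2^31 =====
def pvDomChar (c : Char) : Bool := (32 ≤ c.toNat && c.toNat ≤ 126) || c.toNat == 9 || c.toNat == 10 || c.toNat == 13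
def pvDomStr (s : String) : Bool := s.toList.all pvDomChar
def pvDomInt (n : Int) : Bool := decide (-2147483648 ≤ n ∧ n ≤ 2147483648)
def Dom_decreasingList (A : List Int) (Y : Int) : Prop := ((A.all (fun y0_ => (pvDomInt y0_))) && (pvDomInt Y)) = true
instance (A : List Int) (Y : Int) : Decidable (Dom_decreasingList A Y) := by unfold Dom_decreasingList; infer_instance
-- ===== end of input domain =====

-- B replaces A's counter-driven sliding-window pass by a group-into-maximal-runs-then-emit-window-starts
-- decomposition (objective: alternative; same O(n) cost).

-- ===== PORT A =====
-- the body of A's while-loop; r increases by 1 in both branches, so the loop is a fold over r = 0 .. len(A)-2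
def stepA (A : List Int) (Y : Int) (st : Int × Int × List Int) (r : Int) : Int × Int × List Int :=
  if PySem.List.pyGetD A r 0 - 1 = PySem.List.pyGetD A (r + 1) 0 then
    let count := st.2.1 + 1
    if count = Y - 1 then (st.1 + 1, count - 1, st.2.2 ++ [st.1])
    else (st.1, count, st.2.2)
  else (r + 1, 0, st.2.2)

def decreasingList (A : List Int) (Y : Int) : List Int :=
  ((PySem.List.pyRange 0 ((A.length : Int) - 1) 1).foldl (stepA A Y) (0, 0, [])).2.2

-- ===== PORT B =====
-- inner while-loop of Source B: advance j while the next element decreases by exactly 1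
def runEnd (A : List Int) (j : Nat) : Nat :=
  if _h : j + 1 < A.length ∧ A.getD j 0 - 1 = A.getD (j + 1) 0 then runEnd A (j + 1) else j
termination_by A.length - j
decreasing_by omega

theorem le_runEnd (A : List Int) (i : Nat) : i ≤ runEnd A i := by
  rw [runEnd]
  split
  · exact Nat.le_trans (Nat.le_succ i) (le_runEnd A (i + 1))
  · exact Nat.le_refl i
termination_by A.length - i
decreasing_by omega

-- outer while-loop of Source B
def goB (A : List Int) (Y : Int) (i : Nat) : List Int :=
  if _h : i < A.length then
    (if Y ≥ 2 then PySem.List.pyRange (i : Int) ((runEnd A i : Int) - Y + 2) 1 else [])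
      ++ goB A Y (runEnd A i + 1)
  else []
termination_by A.length - i
decreasing_by have := le_runEnd A i; omega

def decreasingList_alt (A : List Int) (Y : Int) : List Int := goB A Y 0

-- ===== PRECONDITION & SPEC =====
def Spec_decreasingList (A : List Int) (Y : Int) (out : List Int) : Prop := out = decreasingList_alt A Y
instance (A : List Int) (Y : Int) (out : List Int) : Decidable (Spec_decreasingList A Y out) := by unfold Spec_decreasingList; infer_instance

-- ===== CLAIM (what is proved, stated in full; the proofs are below) =====
def Claim_equal_decreasingList : Prop := ∀ (A : List Int) (Y : Int), Dom_decreasingList A Y → Spec_decreasingList A Y (decreasingList A Y)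

-- ===== LEMMAS AND PROOFS =====

theorem runEnd_lt (A : List Int) (i : Nat) (h : i < A.length) : runEnd A i < A.length := by
  rw [runEnd]
  split
  · exact runEnd_lt A (i + 1) (by omega)
  · exact h
termination_by A.length - i
decreasing_by omega

theorem runEnd_steps (A : List Int) (i : Nat) :
    ∀ k : Nat, i ≤ k → k < runEnd A i → A.getD k 0 - 1 = A.getD (k + 1) 0 := by
  intro k hik hk
  rw [runEnd] at hk
  split at hk
  · rename_i h
    rcases Nat.eq_or_lt_of_le hik with rfl | hlt
    · exact h.2
    · exact runEnd_steps A (i + 1) k hlt hk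
  · omega
termination_by A.length - i
decreasing_by omega

theorem runEnd_stop (A : List Int) (i : Nat) :
    ¬ (runEnd A i + 1 < A.length ∧ A.getD (runEnd A i) 0 - 1 = A.getD (runEnd A i + 1) 0) := by
  rw [runEnd]
  split
  · exact runEnd_stop A (i + 1)
  · assumption
termination_by A.length - i
decreasing_by rename_i h; omega

-- processing d consecutive decreasing steps from a fresh run start at i
theorem chainA (A : List Int) (Y : Int) (hY : 2 ≤ Y) (i : Nat) (d : Nat)
    (hsteps : ∀ k : Nat, i ≤ k → k < i + d → A.getD k 0 - 1 = A.getD (k + 1) 0) (acc : List Int) :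
    (PySem.List.pyRange (i : Int) ((i : Int) + (d : Int)) 1).foldl (stepA A Y) ((i : Int), 0, acc)
    = ((i : Int) + max 0 ((d : Int) - (Y - 2)), min (d : Int) (Y - 2),
       acc ++ PySem.List.pyRange (i : Int) ((i : Int) + (d : Int) - Y + 2) 1) := by
  induction d with
  | zero =>
    rw [PySem.List.pyRange_one_eq_nil (by omega), PySem.List.pyRange_one_eq_nil (by omega)]
    simp only [List.foldl_nil, List.append_nil, Prod.mk.injEq]
    exact ⟨by omega, by omega, trivial⟩
  | succ d ih =>
    have hup : ((i : Int) + ((d + 1 : Nat) : Int)) = ((i : Int) + (d : Int)) + 1 := by push_cast; ring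
    rw [hup, PySem.List.pyRange_one_succ_right (by omega), List.foldl_append,
      ih (fun k h1 h2 => hsteps k h1 (by omega))]
    have hcond : PySem.List.pyGetD A ((i : Int) + (d : Int)) 0 - 1
        = PySem.List.pyGetD A ((i : Int) + (d : Int) + 1) 0 := by
      have h := hsteps (i + d) (by omega) (by omega)
      have e2 : (i : Int) + (d : Int) + 1 = ((i + d + 1 : Nat) : Int) := by push_cast; ring
      have e1 : (i : Int) + (d : Int) = ((i + d : Nat) : Int) := by omega
      rw [e2, e1, PySem.List.pyGetD_natCast, PySem.List.pyGetD_natCast]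
      simpa using h
    simp only [List.foldl_cons, List.foldl_nil, stepA, if_pos hcond]
    by_cases hd : (Y : Int) - 2 ≤ (d : Int)
    · rw [if_pos (by omega)]
      simp only [Prod.mk.injEq]
      refine ⟨by push_cast; omega, by push_cast; omega, ?_⟩
      have hl : (i : Int) + max 0 ((d : Int) - (Y - 2)) = (i : Int) + (d : Int) - Y + 2 := by omega
      have hu : (i : Int) + (d : Int) + 1 - Y + 2 = ((i : Int) + (d : Int) - Y + 2) + 1 := by ring
      rw [hl, hu, PySem.List.pyRange_one_succ_right (by omega), List.append_assoc]
    · rw [if_neg (by omega)]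
      simp only [Prod.mk.injEq]
      refine ⟨by push_cast; omega, by push_cast; omega, ?_⟩
      rw [PySem.List.pyRange_one_eq_nil (by omega), PySem.List.pyRange_one_eq_nil (by omega)]

-- the main correspondence for Y ≥ 2: the sliding-window fold started fresh at i equals B's run loop
theorem mainAux (A : List Int) (Y : Int) (hY : 2 ≤ Y) (i : Nat) (acc : List Int) :
    ((PySem.List.pyRange (i : Int) ((A.length : Int) - 1) 1).foldl (stepA A Y) ((i : Int), 0, acc)).2.2
    = acc ++ goB A Y i := by
  by_cases h1 : i + 1 < A.length
  · have hij := le_runEnd A i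
    have hjn := runEnd_lt A i (by omega)
    set j := runEnd A i with hj
    have hsplit : PySem.List.pyRange (i : Int) ((A.length : Int) - 1) 1
        = PySem.List.pyRange (i : Int) (j : Int) 1 ++ PySem.List.pyRange (j : Int) ((A.length : Int) - 1) 1 :=
      PySem.List.pyRange_one_append _ _ _ (by omega) (by omega)
    have hcast : (j : Int) = (i : Int) + ((j - i : Nat) : Int) := by omega
    have hchain := chainA A Y hY i (j - i)
      (fun k hk1 hk2 => runEnd_steps A i k hk1 (by omega)) acc
    rw [hsplit, List.foldl_append, hcast, hchain, ← hcast]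
    rw [goB]
    rw [dif_pos (by omega : i < A.length), if_pos hY, ← hj]
    by_cases h2 : j + 1 < A.length
    · have hstop : ¬ (A.getD j 0 - 1 = A.getD (j + 1) 0) := by
        have := runEnd_stop A i
        rw [← hj] at this
        tauto
      rw [show PySem.List.pyRange ((j : Nat) : Int) ((A.length : Int) - 1) 1
          = ((j : Nat) : Int) :: PySem.List.pyRange (((j : Nat) : Int) + 1) ((A.length : Int) - 1) 1
          from PySem.List.pyRange_one_cons (by omega), List.foldl_cons]
      have hstep : stepA A Y ((i : Int) + max 0 (((j - i : Nat) : Int) - (Y - 2)),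
          min ((j - i : Nat) : Int) (Y - 2),
          acc ++ PySem.List.pyRange (i : Int) ((j : Int) - Y + 2) 1) ((j : Int))
          = ((j : Int) + 1, 0, acc ++ PySem.List.pyRange (i : Int) ((j : Int) - Y + 2) 1) := by
        rw [stepA, if_neg ?_]
        intro hc
        have e2 : ((j : Int)) + 1 = ((j + 1 : Nat) : Int) := by push_cast; ring
        rw [e2, PySem.List.pyGetD_natCast, PySem.List.pyGetD_natCast] at hc
        exact hstop (by simpa using hc)
      rw [hstep]
      have e3 : ((j : Int) + 1) = ((j + 1 : Nat) : Int) := by push_cast; ring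
      rw [e3, mainAux A Y hY (j + 1) (acc ++ PySem.List.pyRange (i : Int) ((j : Int) - Y + 2) 1),
        List.append_assoc]
    · rw [show PySem.List.pyRange ((j : Nat) : Int) ((A.length : Int) - 1) 1 = []
          from PySem.List.pyRange_one_eq_nil (by omega), List.foldl_nil]
      have hg : goB A Y (j + 1) = [] := by rw [goB, dif_neg (by omega)]
      rw [hg, List.append_nil]
  · rw [PySem.List.pyRange_one_eq_nil (by omega), List.foldl_nil]
    by_cases h0 : i < A.length
    · rw [goB, dif_pos h0]
      have hre : runEnd A i = i := by rw [runEnd, dif_neg (by omega)]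
      rw [hre, if_pos hY, PySem.List.pyRange_one_eq_nil (by omega)]
      rw [goB, dif_neg (by omega), List.append_nil]
      simp
    · rw [goB, dif_neg h0, List.append_nil]
termination_by A.length - i
decreasing_by have := le_runEnd A i; omega

-- for Y ≤ 1 the counter never reaches Y-1, so A appends nothing
theorem accNilA (A : List Int) (Y : Int) (hY : Y ≤ 1) :
    ∀ (rs : List Int) (l c : Int), 0 ≤ c → ∀ acc, ((rs.foldl (stepA A Y) (l, c, acc)).2.2) = acc := by
  intro rs
  induction rs with
  | nil => intro l c hc acc; rfl
  | cons r rs ih =>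
    intro l c hc acc
    simp only [List.foldl_cons, stepA]
    split
    · rw [if_neg (by omega)]
      exact ih l (c + 1) (by omega) acc
    · exact ih (r + 1) 0 (by omega) acc

theorem goB_nil (A : List Int) (Y : Int) (hY : ¬ Y ≥ 2) (i : Nat) : goB A Y i = [] := by
  rw [goB]
  by_cases h : i < A.length
  · rw [dif_pos h, if_neg hY, List.nil_append]
    exact goB_nil A Y hY (runEnd A i + 1)
  · rw [dif_neg h]
termination_by A.length - i
decreasing_by have := le_runEnd A i; omega

-- ===== VERDICT (by name: the statement is the Claim_ definition above) =====
theorem decreasingList_spec : Claim_equal_decreasingList := by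
  intro A Y _
  show decreasingList A Y = decreasingList_alt A Y
  unfold decreasingList decreasingList_alt
  by_cases hY : Y ≥ 2
  · have h := mainAux A Y hY 0 []
    simpa using h
  · rw [goB_nil A Y hY 0, accNilA A Y (by omega) _ 0 0 (by omega) []]
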